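-- pv_equiv track=rewrite | github.com/youngjinss/Korean-Bias-SAE | src/visualization/umap_utils.py | compute_feature_overlap
-- ===== SOURCE A (Python) =====
-- from typing import Dict, List, Tuple
--
-- def compute_feature_overlap(
--     demographic2topfeatures: Dict[str, List[int]]
-- ) -> Dict[Tuple[str, str], int]:
--     """
--     Compute pairwise feature overlap between demographics.
--
--     Args:
--         demographic2topfeatures: Map of demographics to top features
--
--     Returns:
--         Dictionary mapping demographic pairs to overlap counts
--     """
--     demographics = list(demographic2topfeatures.keys())
--     overlaps = {}
--
--     for i, demo1 in enumerate(demographics):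
--         for demo2 in demographics[i+1:]:
--             features1 = set(demographic2topfeatures[demo1])
--             features2 = set(demographic2topfeatures[demo2])
--             overlap = len(features1 & features2)
--             overlaps[(demo1, demo2)] = overlap
--
--     return overlaps
-- ===== SOURCE B (Python) =====
-- def compute_feature_overlap(demographic2topfeatures):
--     """Inverted-index rewrite: seed all i<j pairs with 0, build a feature ->
--     holder-index list once, then bump each holder pair per feature."""
--     demographics = list(demographic2topfeatures.keys())
--     n = len(demographics)
--     overlaps = {}
--     for i in range(n):
--         for j in range(i + 1, n):
--             overlaps[(demographics[i], demographics[j])] = 0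
--     holders = {}
--     for i, demo in enumerate(demographics):
--         for f in dict.fromkeys(demographic2topfeatures[demo]):
--             holders[f] = holders.get(f, []) + [i]
--     for idxs in holders.values():
--         for a in range(len(idxs)):
--             for b in range(a + 1, len(idxs)):
--                 key = (demographics[idxs[a]], demographics[idxs[b]])
--                 overlaps[key] = overlaps[key] + 1
--     return overlaps
-- ===== Notes on version B (the rewrite author's own statement) =====
-- stated objective: alternative
-- what changed: A recomputes both feature sets and their intersection for every demographic pair; B seeds all i<j pairs with 0, builds one inverted index (feature -> sorted list of holder demographic indices, deduplicated once per demographic) and bumps each holder pair per feature, so pair counts cost only the actually-shared features.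
import Mathlib
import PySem

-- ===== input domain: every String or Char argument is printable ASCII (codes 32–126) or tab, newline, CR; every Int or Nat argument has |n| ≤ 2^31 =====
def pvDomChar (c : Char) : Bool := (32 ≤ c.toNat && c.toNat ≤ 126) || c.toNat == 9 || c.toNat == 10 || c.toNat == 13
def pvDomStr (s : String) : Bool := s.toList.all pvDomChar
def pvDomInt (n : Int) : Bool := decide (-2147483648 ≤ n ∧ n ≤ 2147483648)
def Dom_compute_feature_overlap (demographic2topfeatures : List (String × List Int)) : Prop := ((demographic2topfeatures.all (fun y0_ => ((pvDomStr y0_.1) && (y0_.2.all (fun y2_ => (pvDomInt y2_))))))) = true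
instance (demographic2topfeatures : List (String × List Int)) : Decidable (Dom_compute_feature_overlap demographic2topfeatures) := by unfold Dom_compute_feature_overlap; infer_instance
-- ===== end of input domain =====

-- B replaces A's per-pair set intersections by a seeded pair table plus one inverted
-- index (feature -> holder indices) whose holder pairs are bumped per feature; same
-- return value, a genuinely different traversal (objective: alternative).

-- ===== PORT A =====
def compute_feature_overlap (demographic2topfeatures : List (String × List Int)) : List (String × String × Int) :=
  let d := PySem.Dict.ofList demographic2topfeatures
  let demographics := d.keys
  let overlaps : PySem.Dict (String × String) Int :=
    (PySem.List.enumerate demographics).foldl (fun ov p =>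
      (PySem.List.slice demographics (some (p.1 + 1)) none).foldl (fun ov demo2 =>
        let features1 := PySem.Set.ofList (d.getD p.2 [])
        let features2 := PySem.Set.ofList (d.getD demo2 [])
        let overlap := PySem.Set.len (PySem.Set.inter features1 features2)
        ov.insert (p.2, demo2) (overlap : Int)) ov)
      PySem.Dict.empty
  overlaps.items.map (fun q => (q.1.1, q.1.2, q.2))

-- ===== PORT B =====
def compute_feature_overlap_alt (demographic2topfeatures : List (String × List Int)) : List (String × String × Int) :=
  let d := PySem.Dict.ofList demographic2topfeatures
  let demographics := d.keys
  let n : Int := demographics.length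
  let overlaps0 : PySem.Dict (String × String) Int :=
    (PySem.List.pyRange 0 n 1).foldl (fun ov i =>
      (PySem.List.pyRange (i + 1) n 1).foldl (fun ov j =>
        ov.insert (PySem.List.pyGetD demographics i "", PySem.List.pyGetD demographics j "") 0) ov)
      PySem.Dict.empty
  let holders : PySem.Dict Int (List Int) :=
    (PySem.List.enumerate demographics).foldl (fun h p =>
      (PySem.List.dedup (d.getD p.2 [])).foldl (fun h f =>
        h.insert f (h.getD f [] ++ [p.1])) h)
      PySem.Dict.empty
  let overlaps :=
    holders.values.foldl (fun ov idxs =>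
      (PySem.List.pyRange 0 (idxs.length : Int) 1).foldl (fun ov a =>
        (PySem.List.pyRange (a + 1) (idxs.length : Int) 1).foldl (fun ov b =>
          let key := (PySem.List.pyGetD demographics (PySem.List.pyGetD idxs a 0) "",
                      PySem.List.pyGetD demographics (PySem.List.pyGetD idxs b 0) "")
          ov.insert key (ov.getD key 0 + 1)) ov) ov)
      overlaps0
  overlaps.items.map (fun q => (q.1.1, q.1.2, q.2))

-- ===== PRECONDITION & SPEC =====
def Spec_compute_feature_overlap (demographic2topfeatures : List (String × List Int)) (out : List (String × String × Int)) : Prop := out = compute_feature_overlap_alt demographic2topfeatures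
instance (demographic2topfeatures : List (String × List Int)) (out : List (String × String × Int)) : Decidable (Spec_compute_feature_overlap demographic2topfeatures out) := by unfold Spec_compute_feature_overlap; infer_instance

-- ===== CLAIM (what is proved, stated in full; the proofs are below) =====
def Claim_equal_compute_feature_overlap : Prop := ∀ (demographic2topfeatures : List (String × List Int)), Dom_compute_feature_overlap demographic2topfeatures → Spec_compute_feature_overlap demographic2topfeatures (compute_feature_overlap demographic2topfeatures)


-- ===== LEMMAS AND PROOFS =====

-- Shorthands used only by the proofs (the ports above do not mention them).
def pvNm (ks : List String) (i : Int) : String := PySem.List.pyGetD ks i ""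

def pvIP (n : Int) : List (Int × Int) :=
  (PySem.List.pyRange 0 n 1).flatMap (fun i => (PySem.List.pyRange (i + 1) n 1).map (fun j => (i, j)))

def pvKey (ks : List String) (q : Int × Int) : String × String := (pvNm ks q.1, pvNm ks q.2)

def pvF (d : PySem.Dict String (List Int)) (k : String) : List Int := d.getD k []

def pvVA (d : PySem.Dict String (List Int)) (ks : List String) (q : Int × Int) : Int :=
  (PySem.Set.len (PySem.Set.inter (PySem.Set.ofList (pvF d (pvNm ks q.1)))
    (PySem.Set.ofList (pvF d (pvNm ks q.2)))) : Int)

-- feature -> (strictly increasing) list of holder indices, as an explicit filter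
def pvLst (d : PySem.Dict String (List Int)) (ks : List String) (f : Int) : List Int :=
  (PySem.List.pyRange 0 (ks.length : Int) 1).filter (fun x => decide (f ∈ pvF d (pvNm ks x)))

-- the flattened (feature, holder index) stream of B's second loop
def pvL (d : PySem.Dict String (List Int)) (ks : List String) : List (Int × Int) :=
  (PySem.List.enumerate ks).flatMap (fun p => (PySem.List.dedup (pvF d p.2)).map (fun f => (f, p.1)))

-- all (a < b) holder pairs of one index list, structurally
def pvPairsOf (ks : List String) : List Int → List (String × String)
  | [] => []
  | x :: r => r.map (fun y => (pvNm ks x, pvNm ks y)) ++ pvPairsOf ks r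

-- the index-pair stream of B's third loop for one index list
def pvPL (ks : List String) (idxs : List Int) : List (String × String) :=
  (PySem.List.pyRange 0 (idxs.length : Int) 1).flatMap (fun a =>
    (PySem.List.pyRange (a + 1) (idxs.length : Int) 1).map (fun b =>
      (pvNm ks (PySem.List.pyGetD idxs a 0), pvNm ks (PySem.List.pyGetD idxs b 0))))




-- nested i<j range loop = flat loop over pvIP

-- Port A's dict fold, rewritten over pvIP





-- B's index-pair stream over one list, structurally

-- counting one key inside one feature's pair list

-- the core: total increments at key (i,j) = A's intersection size
lemma pv_mem_lst {d : PySem.Dict String (List Int)} {ks : List String} {f x : Int} :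
    x ∈ pvLst d ks f ↔ 0 ≤ x ∧ x < ks.length ∧ f ∈ pvF d (pvNm ks x) := by
  simp [pvLst, List.mem_filter, PySem.List.mem_pyRange_one]
  tauto

lemma pv_pairwise_lst (d : PySem.Dict String (List Int)) (ks : List String) (f : Int) :
    (pvLst d ks f).Pairwise (· < ·) :=
  List.Pairwise.filter _ (PySem.List.pairwise_lt_pyRange_one 0 (ks.length : Int))

lemma pv_mem_IP {n : Int} {q : Int × Int} : q ∈ pvIP n ↔ 0 ≤ q.1 ∧ q.1 < q.2 ∧ q.2 < n := by
  simp [pvIP, List.mem_flatMap, PySem.List.mem_pyRange_one]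
  constructor
  · rintro ⟨i, ⟨h0, _⟩, j, ⟨h1, h2⟩, rfl⟩; exact ⟨h0, by omega, h2⟩
  · rintro ⟨h0, h1, h2⟩; exact ⟨q.1, ⟨h0, by omega⟩, q.2, ⟨by omega, h2⟩, rfl⟩

lemma pv_nm_inj {ks : List String} (hk : ks.Nodup) {i j : Int}
    (hi : 0 ≤ i) (hi' : i < ks.length) (hj : 0 ≤ j) (hj' : j < ks.length)
    (h : pvNm ks i = pvNm ks j) : i = j := by
  unfold pvNm at h
  rw [PySem.List.pyGetD_eq_getElem ks "" hi hi', PySem.List.pyGetD_eq_getElem ks "" hj hj'] at h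
  have := (List.Nodup.getElem_inj_iff hk).mp h
  omega

-- Nodup of pvIP itself

lemma pv_nodup_IP (n : Int) : (pvIP n).Nodup := by
  apply List.Pairwise.imp (R := fun p q : Int × Int => p.1 < q.1 ∨ (p.1 = q.1 ∧ p.2 < q.2))
  · rintro p q (h | ⟨h1, h2⟩) rfl <;> omega
  · unfold pvIP
    rw [List.flatMap_def, List.pairwise_flatten]
    refine ⟨?_, ?_⟩
    · intro l hl
      simp only [List.mem_map] at hl
      obtain ⟨i, _, rfl⟩ := hl
      refine List.Pairwise.map _ ?_ (PySem.List.pairwise_lt_pyRange_one _ _)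
      intro a b hab; right; exact ⟨rfl, hab⟩
    · rw [List.pairwise_map]
      apply List.Pairwise.imp_of_mem (R := (· < ·)) ?_ (PySem.List.pairwise_lt_pyRange_one _ _)
      intro i1 i2 hm1 hm2 h12 x hx y hy
      simp only [List.mem_map] at hx hy
      rcases hx with ⟨j1, hj1, e1⟩
      rcases hy with ⟨j2, hj2, e2⟩
      left; rw [← e1, ← e2]; exact h12

lemma pv_nodup_IP_key {ks : List String} (hk : ks.Nodup) :
    ((pvIP (ks.length : Int)).map (pvKey ks)).Nodup := by
  refine List.Nodup.map_on ?_ (pv_nodup_IP _)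
  intro p hp q hq h
  have hpb := pv_mem_IP.mp hp
  have hqb := pv_mem_IP.mp hq
  have h1 : pvNm ks p.1 = pvNm ks q.1 := congrArg Prod.fst h
  have h2 : pvNm ks p.2 = pvNm ks q.2 := congrArg Prod.snd h
  have e1 := pv_nm_inj hk (by omega) (by omega) (by omega) (by omega) h1
  have e2 := pv_nm_inj hk (by omega) (by omega) (by omega) (by omega) h2
  exact Prod.ext e1 e2

lemma pv_foldl_IP {β : Type} (n : Int) (f : β → Int → Int → β) (init : β) :
    (PySem.List.pyRange 0 n 1).foldl (fun acc i =>
      (PySem.List.pyRange (i + 1) n 1).foldl (fun acc j => f acc i j) acc) init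
    = (pvIP n).foldl (fun acc q => f acc q.1 q.2) init := by
  rw [pvIP, List.foldl_flatMap]
  congr 1; funext acc i; rw [List.foldl_map]

lemma pv_flatMap_ite {α : Type} (l : List α) (p : α → Bool) :
    (l.flatMap fun x => if p x then [x] else []) = l.filter p := by
  induction l with
  | nil => rfl
  | cons x r ih => simp only [List.flatMap_cons, List.filter_cons, ih]; split <;> simp

-- the nested holders fold, flattened over pvL

lemma pv_holders_flat (d : PySem.Dict String (List Int)) (ks : List String) :
    ((PySem.List.enumerate ks).foldl (fun h p =>
      (PySem.List.dedup (pvF d p.2)).foldl (fun h g => h.insert g (h.getD g [] ++ [p.1])) h)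
      PySem.Dict.empty)
    = (pvL d ks).foldl (fun h q => h.modify q.1 [] (· ++ [q.2])) PySem.Dict.empty := by
  rw [pvL, List.foldl_flatMap]
  congr 1
  funext h p
  rw [List.foldl_map]
  rfl

lemma pv_holders_getD (d : PySem.Dict String (List Int)) (ks : List String) (f : Int) :
    ((PySem.List.enumerate ks).foldl (fun h p =>
      (PySem.List.dedup (pvF d p.2)).foldl (fun h g => h.insert g (h.getD g [] ++ [p.1])) h)
      PySem.Dict.empty).getD f [] = pvLst d ks f := by
  rw [pv_holders_flat, PySem.Dict.getD_foldl_modify_append, PySem.Dict.getD_empty]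
  rw [pvL, List.filter_flatMap, List.map_flatMap]
  rw [PySem.List.enumerate_eq_map_pyRange ks "", List.flatMap_map]
  rw [pvLst, ← pv_flatMap_ite]
  simp only [List.nil_append]
  congr 1
  funext i
  simp only [List.filter_map, List.map_map]
  have hc : ((fun (p : Int × Int) => p.1 == f) ∘ fun g => (g, i)) = (fun g => g == f) := rfl
  rw [hc, List.filter_beq (l := PySem.List.dedup (pvF d (PySem.List.pyGetD ks i ""))) f]
  by_cases hf : f ∈ pvF d (pvNm ks i)
  · rw [List.count_eq_one_of_mem (PySem.List.nodup_dedup _) (by rw [PySem.List.mem_dedup]; exact hf)]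
    simp only [List.replicate_one, List.map_cons, List.map_nil]
    rw [if_pos (by exact (decide_eq_true_iff).mpr hf)]
    rfl
  · rw [List.count_eq_zero_of_not_mem (by rw [PySem.List.mem_dedup]; exact hf)]
    simp only [List.replicate_zero, List.map_nil]
    rw [if_neg (by simpa using hf)]

lemma pv_holders_keys (d : PySem.Dict String (List Int)) (ks : List String) :
    ((PySem.List.enumerate ks).foldl (fun h p =>
      (PySem.List.dedup (pvF d p.2)).foldl (fun h g => h.insert g (h.getD g [] ++ [p.1])) h)
      PySem.Dict.empty).keys = PySem.Set.ofList ((pvL d ks).map (fun q => q.1)) := by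
  rw [pv_holders_flat]
  have := PySem.Dict.keys_foldl_modify_key (pvL d ks) (fun q => q.1) ([] : List Int)
      (fun _ q => (· ++ [q.2])) PySem.Dict.empty
  simpa [PySem.Set.update_nil_left] using this

lemma pv_mem_L {d : PySem.Dict String (List Int)} {ks : List String} {f x : Int} :
    (f, x) ∈ pvL d ks ↔ ∃ (k : Nat) (h : k < ks.length), x = k ∧ f ∈ pvF d ks[k] := by
  simp only [pvL, List.mem_flatMap, List.mem_map, PySem.List.mem_enumerate_iff, PySem.List.mem_dedup]
  constructor
  · rintro ⟨p, ⟨k, hk, rfl⟩, g, hg, e⟩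
    have e1 : g = f := congrArg Prod.fst e
    have e2 : (0 : Int) + (k : Int) = x := congrArg Prod.snd e
    subst e1
    exact ⟨k, hk, by omega, hg⟩
  · rintro ⟨k, hk, rfl, hf⟩
    exact ⟨(0 + (k : Int), ks[k]), ⟨k, hk, rfl⟩, f, hf, by simp⟩

lemma pv_aux_pairsOf (ks : List String) : ∀ idxs : List Int,
    (List.range idxs.length).flatMap (fun k =>
      (idxs.drop (k + 1)).map (fun y => (pvNm ks (idxs.getD k 0), pvNm ks y)))
    = pvPairsOf ks idxs := by
  intro idxs
  induction idxs with
  | nil => rfl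
  | cons x r ih =>
    rw [List.length_cons, List.range_succ_eq_map, List.flatMap_cons, List.flatMap_map]
    rw [pvPairsOf, ← ih]
    rfl

lemma pv_PL_eq_pairsOf (ks : List String) (idxs : List Int) :
    pvPL ks idxs = pvPairsOf ks idxs := by
  rw [pvPL, PySem.List.pyRange_zero_nat, List.flatMap_map]
  have step : (fun (k : Nat) =>
      (PySem.List.pyRange ((k : Int) + 1) (idxs.length : Int) 1).map (fun b =>
        (pvNm ks (PySem.List.pyGetD idxs (k : Int) 0), pvNm ks (PySem.List.pyGetD idxs b 0))))
      = (fun (k : Nat) =>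
      (idxs.drop (k + 1)).map (fun y => (pvNm ks (idxs.getD k 0), pvNm ks y))) := by
    funext k
    have h1 : (k + 1 : Nat) = ((k : Int) + 1).toNat := by omega
    rw [h1, ← PySem.List.map_pyGetD_pyRange' idxs 0 (a := (k : Int) + 1) (by omega), List.map_map]
    simp [PySem.List.pyGetD_natCast]
  rw [step, pv_aux_pairsOf]

lemma pv_mem_pairsOf {ks : List String} {lst : List Int} {p : String × String}
    (hs : lst.Pairwise (· < ·)) (hp : p ∈ pvPairsOf ks lst) :
    ∃ x y, x ∈ lst ∧ y ∈ lst ∧ x < y ∧ p = (pvNm ks x, pvNm ks y) := by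
  induction lst with
  | nil => cases hp
  | cons x r ih =>
    rw [pvPairsOf, List.mem_append] at hp
    rcases hp with hp | hp
    · obtain ⟨y, hy, rfl⟩ := List.mem_map.mp hp
      exact ⟨x, y, by simp, by simp [hy], (List.pairwise_cons.mp hs).1 y hy, rfl⟩
    · obtain ⟨a, b, ha, hb, hab, rfl⟩ := ih (List.pairwise_cons.mp hs).2 hp
      exact ⟨a, b, by simp [ha], by simp [hb], hab, rfl⟩

lemma pv_count_pairsOf {ks : List String} (hk : ks.Nodup) {lst : List Int} {i j : Int}
    (hs : lst.Pairwise (· < ·)) (hb : ∀ x ∈ lst, 0 ≤ x ∧ x < ks.length)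
    (hi : 0 ≤ i) (hij : i < j) (hj : j < ks.length) :
    (pvPairsOf ks lst).count (pvKey ks (i, j)) =
      (if i ∈ lst ∧ j ∈ lst then 1 else 0) := by
  induction lst with
  | nil => simp [pvPairsOf]
  | cons x r ih =>
    have hx := hb x (by simp)
    have hbr : ∀ y ∈ r, 0 ≤ y ∧ y < ks.length := fun y hy => hb y (by simp [hy])
    have hxr : ∀ y ∈ r, x < y := fun y hy => (List.pairwise_cons.mp hs).1 y hy
    have hsr := (List.pairwise_cons.mp hs).2
    have hnodr : r.Nodup := hsr.imp (fun h => ne_of_lt h)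
    rw [pvPairsOf, List.count_append, ih hsr hbr]
    rw [List.count_eq_countP, List.countP_map]
    by_cases hxi : x = i
    · subst hxi
      have hpred : ∀ y ∈ r, (((fun p => p == pvKey ks (x, j)) ∘ fun y => (pvNm ks x, pvNm ks y)) y) = true
          ↔ (y == j) = true := by
        intro y hy
        have hyb := hbr y hy
        simp only [Function.comp_apply, beq_iff_eq, pvKey, Prod.ext_iff]
        constructor
        · rintro ⟨-, h2⟩
          exact pv_nm_inj hk (by omega) (by omega) (by omega) hj h2
        · rintro rfl; simp
      rw [List.countP_congr hpred]
      have hxnotr : x ∉ r := fun hmem => absurd (hxr x hmem) (lt_irrefl x)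
      have hjx : j ≠ x := by omega
      by_cases hjr : j ∈ r
      · rw [← List.count_eq_countP, List.count_eq_one_of_mem hnodr hjr]
        split_ifs <;> simp_all
      · rw [← List.count_eq_countP, List.count_eq_zero_of_not_mem hjr]
        split_ifs <;> simp_all
    · have hpred0 : List.countP ((fun p => p == pvKey ks (i, j)) ∘ fun y => (pvNm ks x, pvNm ks y)) r = 0 := by
        rw [List.countP_eq_zero]
        intro y hy
        simp only [Function.comp_apply, beq_iff_eq, pvKey, Prod.ext_iff]
        rintro ⟨h1, -⟩
        exact hxi (pv_nm_inj hk (by omega) (by omega) hi (by omega) h1)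
      rw [hpred0]
      have hix : i ≠ x := fun h => hxi h.symm
      by_cases hir : i ∈ r
      · have hjx : j ≠ x := by
          intro h; subst h
          exact absurd (hxr i hir) (by omega)
        have heq : (i ∈ x :: r ∧ j ∈ x :: r) ↔ (i ∈ r ∧ j ∈ r) := by
          simp [hix, hjx]
        rw [if_congr heq rfl rfl]
        omega
      · have heq : (i ∈ x :: r ∧ j ∈ x :: r) ↔ False := by simp [hix]; tauto
        rw [if_congr heq rfl rfl, if_neg (by tauto), if_neg (by exact fun h => h)]

lemma pv_A_eq (dtf : List (String × List Int)) :
    compute_feature_overlap dtf =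
      ((pvIP ((PySem.Dict.ofList dtf).keys.length : Int)).map (fun q =>
        (pvKey (PySem.Dict.ofList dtf).keys q, pvVA (PySem.Dict.ofList dtf) (PySem.Dict.ofList dtf).keys q))).map
        (fun p => (p.1.1, p.1.2, p.2)) := by
  set d := PySem.Dict.ofList dtf with hd
  set ks := d.keys with hks
  have hnd : ks.Nodup := PySem.Dict.nodup_keys_ofList dtf
  have hfold : compute_feature_overlap dtf =
      ((pvIP (ks.length : Int)).foldl (fun ov q => ov.insert (pvKey ks q) (pvVA d ks q))
        PySem.Dict.empty).items.map (fun p => (p.1.1, p.1.2, p.2)) := by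
    rw [compute_feature_overlap]
    rw [← hd, ← hks]
    rw [PySem.List.enumerate_eq_map_pyRange ks "", List.foldl_map]
    rw [← pv_foldl_IP (ks.length : Int)
      (fun ov i j => ov.insert (pvKey ks (i, j)) (pvVA d ks (i, j))) PySem.Dict.empty]
    have hlen : PySem.List.len ks = (ks.length : Int) := by simp
    rw [hlen]
    congr 2
    apply PySem.List.foldl_congr_mem
    intro acc i hi
    have hi' := PySem.List.mem_pyRange_one.mp hi
    rw [PySem.List.slice_from ks (a := i + 1) (by omega)]
    rw [← PySem.List.map_pyGetD_pyRange' ks "" (a := i + 1) (by omega), List.foldl_map]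
    rfl
  rw [hfold]
  rw [PySem.Dict.items_foldl_insert_fresh (pvIP (ks.length : Int)) (pvKey ks)
    (fun q => pvVA d ks q) PySem.Dict.empty (fun a _ => rfl) (pv_nodup_IP_key hnd)]
  rfl

lemma pv_sum_boole {α : Type} (l : List α) (p : α → Bool) :
    (l.map (fun x => if p x then (1 : Nat) else 0)).sum = l.countP p := by
  induction l with
  | nil => rfl
  | cons x r ih => by_cases h : p x <;> simp [h, ih, Nat.add_comm]

lemma pv_mem_keys_of_mem_F {d : PySem.Dict String (List Int)} {ks : List String} {f i : Int}
    (hi : 0 ≤ i) (hi' : i < ks.length) (hf : f ∈ pvF d (pvNm ks i)) :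
    f ∈ PySem.Set.ofList ((pvL d ks).map (fun q => q.1)) := by
  rw [PySem.Set.mem_ofList, List.mem_map]
  refine ⟨(f, i), ?_, rfl⟩
  rw [pv_mem_L]
  refine ⟨i.toNat, by omega, by omega, ?_⟩
  have : ks[i.toNat] = pvNm ks i := by
    rw [pvNm, PySem.List.pyGetD_eq_getElem ks "" hi hi']
  rw [this]
  exact hf

lemma pv_count_INC (d : PySem.Dict String (List Int)) (ks : List String) (hk : ks.Nodup)
    {i j : Int} (hi : 0 ≤ i) (hij : i < j) (hj : j < ks.length) :
    (((PySem.Set.ofList ((pvL d ks).map (fun q => q.1))).flatMap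
        (fun f => pvPairsOf ks (pvLst d ks f))).count (pvKey ks (i, j)))
      = (pvVA d ks (i, j)).toNat := by
  set K := PySem.Set.ofList ((pvL d ks).map (fun q => q.1)) with hK
  have hndK : K.Nodup := PySem.Set.nodup_ofList _
  rw [List.count_eq_countP, List.countP_flatMap]
  have hmapeq : ∀ f ∈ K, (List.countP (fun x => x == pvKey ks (i, j)) ∘ fun f => pvPairsOf ks (pvLst d ks f)) f
      = if f ∈ pvF d (pvNm ks i) ∧ f ∈ pvF d (pvNm ks j) then (1 : Nat) else 0 := by
    intro f _
    have hc : List.countP (fun x => x == pvKey ks (i, j)) (pvPairsOf ks (pvLst d ks f))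
        = (pvPairsOf ks (pvLst d ks f)).count (pvKey ks (i, j)) := (List.count_eq_countP).symm
    rw [Function.comp_apply, hc,
      pv_count_pairsOf hk (pv_pairwise_lst d ks f) (fun x hx => by
        have := pv_mem_lst.mp hx; exact ⟨this.1, this.2.1⟩) hi hij hj]
    congr 1
    rw [eq_iff_iff]
    constructor
    · rintro ⟨h1, h2⟩
      exact ⟨(pv_mem_lst.mp h1).2.2, (pv_mem_lst.mp h2).2.2⟩
    · rintro ⟨h1, h2⟩
      exact ⟨pv_mem_lst.mpr ⟨hi, by omega, h1⟩, pv_mem_lst.mpr ⟨by omega, hj, h2⟩⟩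
  rw [List.map_congr_left hmapeq]
  have : (K.map (fun f => if f ∈ pvF d (pvNm ks i) ∧ f ∈ pvF d (pvNm ks j) then (1 : Nat) else 0)).sum
      = K.countP (fun f => decide (f ∈ pvF d (pvNm ks i) ∧ f ∈ pvF d (pvNm ks j))) := by
    rw [← pv_sum_boole K (fun f => decide (f ∈ pvF d (pvNm ks i) ∧ f ∈ pvF d (pvNm ks j)))]
    apply congrArg
    apply List.map_congr_left
    intro x _
    split_ifs with h1 h2 <;> simp_all
  rw [this, List.countP_eq_length_filter]
  -- right-hand side: the intersection length
  have hrhs : (pvVA d ks (i, j)).toNat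
      = ((PySem.Set.ofList (pvF d (pvNm ks i))).filter
          (fun x => PySem.Set.contains (PySem.Set.ofList (pvF d (pvNm ks j))) x)).length := by
    simp [pvVA, PySem.Set.inter, PySem.Set.len]
  rw [hrhs]
  apply List.Perm.length_eq
  apply (List.perm_ext_iff_of_nodup (List.Nodup.filter _ hndK)
    (List.Nodup.filter _ (PySem.Set.nodup_ofList _))).mpr
  intro f
  simp only [List.mem_filter, decide_eq_true_eq, PySem.Set.mem_ofList, PySem.Set.contains_iff, hK]
  have hin := fun (h1 : f ∈ pvF d (pvNm ks i)) =>
    pv_mem_keys_of_mem_F (d := d) (ks := ks) hi (by omega) h1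
  simp only [PySem.Set.mem_ofList] at hin
  tauto

lemma pv_mem_keys0 {ks : List String} {d : PySem.Dict String (List Int)} {y : String × String}
    (hy : y ∈ (PySem.Set.ofList ((pvL d ks).map (fun q => q.1))).flatMap
      (fun f => pvPairsOf ks (pvLst d ks f))) :
    y ∈ (pvIP (ks.length : Int)).map (pvKey ks) := by
  obtain ⟨f, -, hyf⟩ := List.mem_flatMap.mp hy
  obtain ⟨x, z, hx, hz, hxz, rfl⟩ := pv_mem_pairsOf (pv_pairwise_lst d ks f) hyf
  have hxb := pv_mem_lst.mp hx
  have hzb := pv_mem_lst.mp hz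
  exact List.mem_map.mpr ⟨(x, z), pv_mem_IP.mpr ⟨hxb.1, hxz, hzb.2.1⟩, rfl⟩

lemma pv_B_eq (dtf : List (String × List Int)) :
    compute_feature_overlap_alt dtf =
      ((pvIP ((PySem.Dict.ofList dtf).keys.length : Int)).map (fun q =>
        (pvKey (PySem.Dict.ofList dtf).keys q, pvVA (PySem.Dict.ofList dtf) (PySem.Dict.ofList dtf).keys q))).map
        (fun p => (p.1.1, p.1.2, p.2)) := by
  set d := PySem.Dict.ofList dtf with hd
  set ks := d.keys with hks
  have hnd : ks.Nodup := PySem.Dict.nodup_keys_ofList dtf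
  set n : Int := (ks.length : Int) with hn
  -- the three intermediate objects of port B, in analysed form
  set OV0 : PySem.Dict (String × String) Int :=
    (pvIP n).foldl (fun ov q => ov.insert (pvKey ks q) 0) PySem.Dict.empty with hOV0
  set H : PySem.Dict Int (List Int) :=
    (PySem.List.enumerate ks).foldl (fun h p =>
      (PySem.List.dedup (pvF d p.2)).foldl (fun h g => h.insert g (h.getD g [] ++ [p.1])) h)
      PySem.Dict.empty with hH
  set INC : List (String × String) :=
    (PySem.Set.ofList ((pvL d ks).map (fun q => q.1))).flatMap
      (fun f => pvPairsOf ks (pvLst d ks f)) with hINC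
  -- facts about OV0
  have hitems0 : OV0.items = (pvIP n).map (fun q => (pvKey ks q, (0 : Int))) := by
    rw [hOV0, PySem.Dict.items_foldl_insert_fresh (pvIP n) (pvKey ks) (fun _ => (0 : Int))
      PySem.Dict.empty (fun a _ => rfl) (pv_nodup_IP_key hnd)]
    rfl
  have hkeys0 : OV0.keys = (pvIP n).map (pvKey ks) := by
    show OV0.items.map Prod.fst = _
    rw [hitems0, List.map_map]
    rfl
  have hndk0 : OV0.keys.Nodup := by rw [hkeys0]; exact pv_nodup_IP_key hnd
  -- facts about H
  have hndkH : H.keys.Nodup := by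
    rw [hH, pv_holders_keys d ks]; exact PySem.Set.nodup_ofList _
  have hvalsH : H.values = ((pvL d ks).map (fun q => q.1) |> PySem.Set.ofList).map
      (fun f => pvLst d ks f) := by
    rw [PySem.Dict.values_eq_map_keys H hndkH [], hH, pv_holders_keys d ks]
    apply List.map_congr_left
    intro f _
    rw [← hH]
    show H.getD f [] = pvLst d ks f
    rw [hH, pv_holders_getD d ks f]
  -- the port, rewritten as a flat counting fold over INC
  have hport : compute_feature_overlap_alt dtf =
      (INC.foldl (fun ov k => ov.insert k (ov.getD k 0 + 1)) OV0).items.map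
        (fun p => (p.1.1, p.1.2, p.2)) := by
    rw [compute_feature_overlap_alt]
    rw [← hd, ← hks]
    congr 1
    have e0 : (PySem.List.pyRange 0 (ks.length : Int) 1).foldl (fun ov i =>
        (PySem.List.pyRange (i + 1) (ks.length : Int) 1).foldl (fun ov j =>
          ov.insert (PySem.List.pyGetD ks i "", PySem.List.pyGetD ks j "") 0) ov)
        PySem.Dict.empty = OV0 := by
      rw [hOV0, hn, ← pv_foldl_IP (ks.length : Int)
        (fun ov i j => ov.insert (pvKey ks (i, j)) (0 : Int)) PySem.Dict.empty]
      rfl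
    rw [e0]
    have eH : (PySem.List.enumerate ks).foldl (fun h p =>
        (PySem.List.dedup (d.getD p.2 [])).foldl (fun h f => h.insert f (h.getD f [] ++ [p.1])) h)
        PySem.Dict.empty = H := by rw [hH]; rfl
    rw [eH]
    -- inner double range loop over one idxs list = fold over its pair list
    have hinner : ∀ (ov : PySem.Dict (String × String) Int) (idxs : List Int),
        (PySem.List.pyRange 0 (idxs.length : Int) 1).foldl (fun ov a =>
          (PySem.List.pyRange (a + 1) (idxs.length : Int) 1).foldl (fun ov b =>
            ov.insert (PySem.List.pyGetD ks (PySem.List.pyGetD idxs a 0) "",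
                       PySem.List.pyGetD ks (PySem.List.pyGetD idxs b 0) "")
              (ov.getD (PySem.List.pyGetD ks (PySem.List.pyGetD idxs a 0) "",
                        PySem.List.pyGetD ks (PySem.List.pyGetD idxs b 0) "") 0 + 1)) ov) ov
        = (pvPL ks idxs).foldl (fun ov k => ov.insert k (ov.getD k 0 + 1)) ov := by
      intro ov idxs
      rw [pvPL, List.foldl_flatMap]
      congr 1
      funext acc a
      rw [List.foldl_map]
      rfl
    have houter : H.values.foldl (fun ov idxs =>
        (pvPL ks idxs).foldl (fun ov k => ov.insert k (ov.getD k 0 + 1)) ov) OV0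
        = INC.foldl (fun ov k => ov.insert k (ov.getD k 0 + 1)) OV0 := by
      rw [← List.foldl_flatMap]
      congr 1
      rw [hvalsH, List.flatMap_map, hINC]
      exact List.flatMap_congr (fun f _ => pv_PL_eq_pairsOf ks _)
    rw [← houter]
    congr 1
    apply PySem.List.foldl_congr_mem
    intro acc idxs _
    rw [← hinner acc idxs]
  rw [hport]
  -- all increment keys are already seeded
  have hkeysF : (INC.foldl (fun ov k => ov.insert k (ov.getD k 0 + 1)) OV0).keys = OV0.keys := by
    rw [PySem.Dict.keys_foldl_insert INC (fun d x => d.getD x 0 + 1) OV0,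
      PySem.Set.update_eq_append_filter]
    have : (PySem.Set.ofList INC).filter (fun y => !PySem.Set.contains OV0.keys y) = [] := by
      rw [List.filter_eq_nil_iff]
      intro y hy
      have hy' : y ∈ INC := by rwa [PySem.Set.mem_ofList] at hy
      have hmem : y ∈ OV0.keys := by
        rw [hkeys0]
        rw [hINC] at hy'
        exact pv_mem_keys0 hy' 
      simp [hmem]
    rw [this, List.append_nil]
  have hndF : (INC.foldl (fun ov k => ov.insert k (ov.getD k 0 + 1)) OV0).keys.Nodup := by
    rw [hkeysF]; exact hndk0
  rw [PySem.Dict.items_eq_map_keys _ hndF 0, hkeysF, hkeys0]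
  simp only [List.map_map]
  apply List.map_congr_left
  intro q hq
  have hqb := pv_mem_IP.mp hq
  have hgd : (INC.foldl (fun ov k => ov.insert k (ov.getD k 0 + 1)) OV0).getD (pvKey ks q) 0
      = OV0.getD (pvKey ks q) 0 + (INC.count (pvKey ks q) : Int) :=
    PySem.Dict.getD_foldl_insert_add_one INC OV0 (pvKey ks q)
  have hgd0 : OV0.getD (pvKey ks q) 0 = 0 := by
    exact PySem.Dict.getD_of_mem_items OV0
      (by rw [hitems0]; exact List.mem_map.mpr ⟨q, hq, rfl⟩) hndk0 0
  have hcnt : INC.count (pvKey ks q) = (pvVA d ks q).toNat := by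
    rw [hINC]
    have := pv_count_INC d ks hnd (i := q.1) (j := q.2) hqb.1 hqb.2.1 hqb.2.2
    simpa using this
  have hva : ((pvVA d ks q).toNat : Int) = pvVA d ks q := by
    have : (0 : Int) ≤ pvVA d ks q := by simp [pvVA]
    omega
  simp only [Function.comp_apply, hgd, hgd0, hcnt, hva, zero_add]

-- ===== VERDICT (by name: the statement is the Claim_ definition above) =====
theorem compute_feature_overlap_spec : Claim_equal_compute_feature_overlap := by
  intro dtf _
  unfold Spec_compute_feature_overlap
  rw [pv_A_eq, pv_B_eq]
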